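-- pv_equiv track=rewrite | github.com/edenai/edenai-apis | edenai_apis/utils/conversion.py | add_query_param_in_url
-- ===== SOURCE A (Python) =====
-- is_first_param_in_url = lambda url: "?" not in url
--
-- def add_query_param_in_url(url: str, query_params: dict):
--     if query_params and url:
--         for key, value in query_params.items():
--             if not key or not value:
--                 continue
--             url = (
--                 f"{url}?{key}={value}"
--                 if is_first_param_in_url(url)
--                 else f"{url}&{key}={value}"
--             )
--     return url
-- ===== SOURCE B (Python) =====
-- def add_query_param_in_url(url: str, query_params: dict):
--     if not query_params or not url:
--         return url
--     parts = [f"{key}={value}" for key, value in query_params.items() if key and value]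
--     if not parts:
--         return url
--     sep = "?" if "?" not in url else "&"
--     return url + sep + "&".join(parts)
-- ===== Notes on version B (the rewrite author's own statement) =====
-- stated objective: simpler
-- what changed: Replaces A's stateful loop that rebuilds the url incrementally and re-scans it for '?' every iteration with a filter-and-join: collect the valid 'key=value' parts once, decide the separator ('?' or '&') once from the original url, and append a single '&'-join.
import Mathlib
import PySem

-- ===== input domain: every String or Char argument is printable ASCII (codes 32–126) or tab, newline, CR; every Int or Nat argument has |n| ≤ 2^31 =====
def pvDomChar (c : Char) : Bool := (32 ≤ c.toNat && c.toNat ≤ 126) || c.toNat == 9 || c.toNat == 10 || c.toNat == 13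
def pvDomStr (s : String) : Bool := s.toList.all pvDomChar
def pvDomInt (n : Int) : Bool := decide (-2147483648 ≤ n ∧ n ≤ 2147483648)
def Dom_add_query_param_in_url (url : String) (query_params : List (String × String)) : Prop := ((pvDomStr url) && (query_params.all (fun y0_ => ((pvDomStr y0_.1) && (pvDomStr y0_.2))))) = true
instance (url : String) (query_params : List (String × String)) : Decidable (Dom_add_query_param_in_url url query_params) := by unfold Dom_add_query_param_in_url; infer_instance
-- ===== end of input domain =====

-- B replaces A's stateful loop (which re-scans the growing URL for '?' each iteration)
-- by filter-then-single-join with the separator decided once; objective: simpler.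


-- ===== PORT A =====
-- the running url is carried as List Char (PySem's string representation);
-- f-string concatenation is list append, '"?" not in url' is PySem.Chars.isIn
def add_query_param_in_url (url : String) (query_params : List (String × String)) : String :=
  if query_params ≠ [] ∧ url ≠ "" then
    String.ofList (query_params.foldl (fun (u : List Char) kv =>
      if kv.1 = "" ∨ kv.2 = "" then u
      else if PySem.Chars.isIn ['?'] u = false then u ++ '?' :: (kv.1.toList ++ '=' :: kv.2.toList)
      else u ++ '&' :: (kv.1.toList ++ '=' :: kv.2.toList)) url.toList)
  else url

-- ===== PORT B =====
def add_query_param_in_url_alt (url : String) (query_params : List (String × String)) : String :=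
  if query_params = [] ∨ url = "" then url
  else
    let parts := (query_params.filter (fun kv => kv.1 ≠ "" ∧ kv.2 ≠ "")).map
      (fun kv => kv.1.toList ++ '=' :: kv.2.toList)
    if parts = [] then url
    else
      let sep : Char := if PySem.Chars.isIn ['?'] url.toList then '&' else '?'
      String.ofList (url.toList ++ sep :: List.intercalate ['&'] parts)

-- ===== PRECONDITION & SPEC =====
def Spec_add_query_param_in_url (url : String) (query_params : List (String × String)) (out : String) : Prop := out = add_query_param_in_url_alt url query_params
instance (url : String) (query_params : List (String × String)) (out : String) : Decidable (Spec_add_query_param_in_url url query_params out) := by unfold Spec_add_query_param_in_url; infer_instance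

-- ===== CLAIM (what is proved, stated in full; the proofs are below) =====
def Claim_equal_add_query_param_in_url : Prop := ∀ (url : String) (query_params : List (String × String)), Dom_add_query_param_in_url url query_params → Spec_add_query_param_in_url url query_params (add_query_param_in_url url query_params)

-- ===== LEMMAS AND PROOFS =====

-- abbreviations for the proof (A's loop body, the valid filter, a kv rendered as chars)
def pvStep (u : List Char) (kv : String × String) : List Char :=
  if kv.1 = "" ∨ kv.2 = "" then u
  else if PySem.Chars.isIn ['?'] u = false then u ++ '?' :: (kv.1.toList ++ '=' :: kv.2.toList)
  else u ++ '&' :: (kv.1.toList ++ '=' :: kv.2.toList)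

def pvValid (kv : String × String) : Bool := kv.1 ≠ "" ∧ kv.2 ≠ ""

def pvPart (kv : String × String) : List Char := kv.1.toList ++ '=' :: kv.2.toList

def pvGlue (ps : List (List Char)) : List Char := (ps.map (fun p => '&' :: p)).flatten

theorem pvIsIn_mem (u : List Char) : PySem.Chars.isIn ['?'] u = true ↔ '?' ∈ u := by
  rw [PySem.Chars.isIn_iff_infix]
  constructor
  · intro h; exact h.subset (List.mem_singleton_self _)
  · intro h
    obtain ⟨s, t, rfl⟩ := List.append_of_mem h
    exact ⟨s, t, by simp⟩

theorem pvIntercalate_eq_glue (p : List Char) (ps : List (List Char)) :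
    List.intercalate ['&'] (p :: ps) = p ++ pvGlue ps := by
  induction ps generalizing p with
  | nil => simp [List.intercalate, pvGlue]
  | cons q qs ih =>
      simp only [pvGlue, List.map_cons, List.flatten_cons]
      rw [show List.intercalate ['&'] (p :: q :: qs)
            = p ++ ['&'] ++ List.intercalate ['&'] (q :: qs) from by
          simp [List.intercalate, List.intersperse]]
      rw [ih q]; simp [pvGlue]

-- A's loop when the url already contains '?': every valid param appends "&part"
theorem pvFold_quest (qps : List (String × String)) (u : List Char) (hq : '?' ∈ u) :
    qps.foldl pvStep u = u ++ pvGlue ((qps.filter pvValid).map pvPart) := by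
  induction qps generalizing u with
  | nil => simp [pvGlue]
  | cons kv rest ih =>
      by_cases hv : kv.1 = "" ∨ kv.2 = ""
      · have : pvStep u kv = u := by simp [pvStep, hv]
        rw [List.foldl_cons, this, ih u hq]
        have hf : List.filter pvValid (kv :: rest) = List.filter pvValid rest := by
          simp only [List.filter_cons]
          simp [pvValid]; tauto
        rw [hf]
      · have hin : PySem.Chars.isIn ['?'] u = true := (pvIsIn_mem u).mpr hq
        have hstep : pvStep u kv = u ++ '&' :: pvPart kv := by
          simp [pvStep, pvPart, hv, hin]
        have hq' : '?' ∈ u ++ '&' :: pvPart kv := by simp [hq]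
        rw [List.foldl_cons, hstep, ih _ hq']
        have hvb : pvValid kv = true := by simp [pvValid]; tauto
        simp [hvb, pvGlue]

-- A's loop when the url does not yet contain '?': the first valid param brings the '?'
theorem pvFold_noquest (qps : List (String × String)) (u : List Char) (hq : '?' ∉ u) :
    qps.foldl pvStep u =
      if (qps.filter pvValid).map pvPart = [] then u
      else u ++ '?' :: List.intercalate ['&'] ((qps.filter pvValid).map pvPart) := by
  induction qps generalizing u with
  | nil => simp
  | cons kv rest ih =>
      by_cases hv : kv.1 = "" ∨ kv.2 = ""
      · have : pvStep u kv = u := by simp [pvStep, hv]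
        rw [List.foldl_cons, this, ih u hq]
        have hf : List.filter pvValid (kv :: rest) = List.filter pvValid rest := by
          simp only [List.filter_cons]
          simp [pvValid]; tauto
        rw [hf]
      · have hin : PySem.Chars.isIn ['?'] u = false := by
          cases h : PySem.Chars.isIn ['?'] u with
          | false => rfl
          | true => exact absurd ((pvIsIn_mem u).mp h) hq
        have hstep : pvStep u kv = u ++ '?' :: pvPart kv := by
          simp [pvStep, pvPart, hv, hin]
        have hq' : '?' ∈ u ++ '?' :: pvPart kv := by simp
        rw [List.foldl_cons, hstep, pvFold_quest rest _ hq']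
        have hvb : pvValid kv = true := by simp [pvValid]; tauto
        simp only [List.filter_cons, hvb, if_pos, List.map_cons]
        rw [pvIntercalate_eq_glue]
        simp

-- ===== VERDICT (by name: the statement is the Claim_ definition above) =====
theorem add_query_param_in_url_spec : Claim_equal_add_query_param_in_url := by
  intro url qps _
  show add_query_param_in_url url qps = add_query_param_in_url_alt url qps
  show (if qps ≠ [] ∧ url ≠ "" then String.ofList (qps.foldl pvStep url.toList) else url) =
       (if qps = [] ∨ url = "" then url else
         if (qps.filter pvValid).map pvPart = [] then url
         else String.ofList (url.toList ++
           (if PySem.Chars.isIn ['?'] url.toList then '&' else '?')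
             :: List.intercalate ['&'] ((qps.filter pvValid).map pvPart)))
  by_cases hempty : qps = [] ∨ url = ""
  · rw [if_neg (by tauto), if_pos hempty]
  · rw [if_pos (by tauto), if_neg hempty]
    by_cases hq : '?' ∈ url.toList
    · have hin : PySem.Chars.isIn ['?'] url.toList = true := (pvIsIn_mem _).mpr hq
      rw [pvFold_quest qps url.toList hq, hin, if_pos rfl]
      by_cases hp : (qps.filter pvValid).map pvPart = []
      · rw [if_pos hp, hp]
        simp [pvGlue, String.ofList_toList]
      · obtain ⟨p, ps, hcons⟩ := List.exists_cons_of_ne_nil hp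
        rw [if_neg hp, hcons, pvIntercalate_eq_glue]
        simp [pvGlue]
    · have hin : PySem.Chars.isIn ['?'] url.toList = false := by
        cases h : PySem.Chars.isIn ['?'] url.toList with
        | false => rfl
        | true => exact absurd ((pvIsIn_mem _).mp h) hq
      rw [pvFold_noquest qps url.toList hq, hin]
      simp only [Bool.false_eq_true, if_false]
      split_ifs with h
      · simp [String.ofList_toList]
      · rfl
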